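-- pv_equiv track=rewrite | github.com/Terracom12/advent-of-code | 2025/day8/sol.py | part1
-- ===== SOURCE A (Python) =====
-- from collections import Counter
-- from functools import reduce
-- import itertools
-- import operator
--
-- class UnionFind:
--     def __init__(self, n: int):
--         self._parents = [i for i in range(n)]
--         self._size = [1] * n
--
--     def get_parent(self, n: int) -> int:
--         p = self._parents[n]
--         if p != n:
--             p = self._parents[n] = self.get_parent(p)
--         return self._parents[n]
--
--     def union(self, a: int, b: int) -> int:
--         ap = self.get_parent(a)
--         bp = self.get_parent(b)
--
--         asz = self._size[ap]
--         bsz = self._size[bp]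
--
--         if ap == bp:
--             return asz
--
--         if ap > bp:
--             self._parents[bp] = ap
--             self._size[ap] += bsz
--         else:
--             self._parents[ap] = bp;
--             self._size[bp] += asz
--
--         return asz + bsz
--
--     def find(self, a: int, b: int) -> bool:
--         return self.get_parent(a) == self.get_parent(b)
--
--     def get_unions(self) -> Counter:
--         for i in range(len(self._parents)):
--             self._parents[i] = self.get_parent(i)
--         return Counter(self._parents)
--
-- def dist(a: tuple[int,int,int], b: tuple[int,int,int]) -> int:
--     return sum(abs(aa - bb) ** 2 for aa,bb in zip(a,b))
--
-- def part1(inp) -> int: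
--     L = len(inp)
--
--     uf = UnionFind(L)
--
--     # (idx,idx)
--     pairs = list(itertools.combinations(range(L), 2))
--     pairs.sort(key=lambda it: dist(inp[it[0]],inp[it[1]]))
--
--     NCONNECTIONS = 10 if len(inp) < 25 else 1000
--
--     for ai,bi in pairs[:NCONNECTIONS]:
--         uf.union(ai, bi)
--
--     us = uf.get_unions()
--     sizes_only = list(sorted(us.values()))
--
--     return reduce(operator.mul, sizes_only[-3:])
-- ===== SOURCE B (Python) =====
-- def _relabel(label, a, b):
--     """Merge the component labels of nodes a and b in one scan."""
--     la, lb = label[a], label[b]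
--     if la != lb:
--         return [lb if x == la else x for x in label]
--     return label
--
-- def part1(inp) -> int:
--     L = len(inp)
--     pairs = [(i, j) for i in range(L) for j in range(i + 1, L)]
--     pairs.sort(key=lambda p: sum((a - b) ** 2 for a, b in zip(inp[p[0]], inp[p[1]])))
--     ncon = 10 if L < 25 else 1000
--
--     # connected components by label propagation over the selected edges
--     label = list(range(L))
--     for a, b in pairs[:ncon]:
--         label = _relabel(label, a, b)
--
--     counts = {}
--     for x in label:
--         counts[x] = counts.get(x, 0) + 1
--
--     prod = 1
--     for s in sorted(counts.values())[-3:]: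
--         prod *= s
--     return prod
-- ===== Notes on version B (the rewrite author's own statement) =====
-- stated objective: simpler
-- what changed: Replaces A's size-tracking union-find with path compression (and a Counter over final roots) by plain label propagation: a list of component labels where each accepted edge merges two components in one scan; same edge selection, component sizes and final product. Pre_ excludes only the empty list, on which A's reduce over an empty sequence raises TypeError.
import Mathlib
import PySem

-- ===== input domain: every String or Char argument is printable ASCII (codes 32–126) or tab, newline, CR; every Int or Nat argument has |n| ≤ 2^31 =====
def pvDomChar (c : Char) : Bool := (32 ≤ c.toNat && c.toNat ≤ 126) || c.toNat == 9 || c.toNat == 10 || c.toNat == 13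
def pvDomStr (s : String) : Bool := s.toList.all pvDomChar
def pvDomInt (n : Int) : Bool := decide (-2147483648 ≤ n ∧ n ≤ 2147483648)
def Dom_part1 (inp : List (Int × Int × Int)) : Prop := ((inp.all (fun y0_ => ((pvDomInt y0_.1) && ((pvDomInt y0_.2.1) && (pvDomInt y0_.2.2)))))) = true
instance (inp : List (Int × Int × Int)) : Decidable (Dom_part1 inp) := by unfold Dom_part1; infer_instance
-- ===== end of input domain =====

-- B replaces A's size-tracking union-find (path compression + Counter of roots) by label-propagation
-- connected components with a single running product; same edge selection, same result (objective: simpler).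

-- ===== PORT A =====

-- dist(a, b) = sum(abs(aa - bb) ** 2 for aa, bb in zip(a, b))  (zip of two 3-tuples written out)
def distA (a b : Int × Int × Int) : Int :=
  ([(a.1, b.1), (a.2.1, b.2.1), (a.2.2, b.2.2)].map (fun p => |p.1 - p.2| ^ 2)).sum

-- list(itertools.combinations(range(L), 2)) : all (i, j), i < j < L, in lexicographic order (exact)
def pairsA (L : Nat) : List (Nat × Nat) :=
  (List.range L).flatMap (fun i => ((List.range L).drop (i + 1)).map (fun j => (i, j)))

-- UnionFind.get_parent with path compression; Python's recursion terminates because parents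
-- strictly increase along a chain, so fuel = number of nodes is enough (the proof shows this).
-- State is the _parents list; returns the updated list and the root.
def gpA (fuel : Nat) (ps : List Nat) (n : Nat) : List Nat × Nat :=
  match fuel with
  | 0 => (ps, ps.getD n n)
  | f + 1 =>
    let p := ps.getD n n            -- p = self._parents[n]  (n is always in range)
    if p ≠ n then
      let r := gpA f ps p           -- p = self._parents[n] = self.get_parent(p)
      (r.1.set n r.2, r.2)          -- return self._parents[n]
    else (ps, p)

-- UnionFind.union on state (parents, sizes); the Python return value (a size) is discarded by part1
def unionA (fuel : Nat) (st : List Nat × List Int) (a b : Nat) : List Nat × List Int :=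
  let g1 := gpA fuel st.1 a
  let ap := g1.2
  let g2 := gpA fuel g1.1 b
  let bp := g2.2
  let ps := g2.1
  let asz := st.2.getD ap 0
  let bsz := st.2.getD bp 0
  if ap = bp then (ps, st.2)
  else if ap > bp then (ps.set bp ap, st.2.set ap (asz + bsz))
  else (ps.set ap bp, st.2.set bp (bsz + asz))

-- get_unions: for i in range(L): self._parents[i] = self.get_parent(i)
def getUnionsPs (fuel : Nat) (L : Nat) (ps : List Nat) : List Nat :=
  (List.range L).foldl (fun ps i => let g := gpA fuel ps i; g.1.set i g.2) ps

def part1 (inp : List (Int × Int × Int)) : Int :=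
  let L := inp.length
  let st0 : List Nat × List Int := (List.range L, List.replicate L 1)   -- UnionFind(L)
  let pairs := PySem.List.sorted (pairsA L)
    (fun it => distA (inp.getD it.1 (0, 0, 0)) (inp.getD it.2 (0, 0, 0))) false
  let ncon : Nat := if L < 25 then 10 else 1000
  let st := (pairs.take ncon).foldl (fun st p => unionA L st p.1 p.2) st0   -- pairs[:NCONNECTIONS]
  let us := PySem.Dict.counter (getUnionsPs L L st.1)                        -- Counter(self._parents)
  let sizesOnly := PySem.List.sorted us.values (fun x => x) false
  -- reduce(operator.mul, sizes_only[-3:]): raises TypeError on an empty list, excluded by Pre_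
  match PySem.List.slice sizesOnly (some (-3)) none with
  | [] => 0
  | h :: t => t.foldl (fun acc x => acc * x) h

-- ===== PORT B =====

-- sum((a - b) ** 2 for a, b in zip(inp[p[0]], inp[p[1]]))
def distB (a b : Int × Int × Int) : Int :=
  ([(a.1, b.1), (a.2.1, b.2.1), (a.2.2, b.2.2)].map (fun p => (p.1 - p.2) ^ 2)).sum

-- [(i, j) for i in range(L) for j in range(i + 1, L)]
def pairsB (L : Nat) : List (Nat × Nat) :=
  (List.range L).flatMap (fun i => ((List.range L).drop (i + 1)).map (fun j => (i, j)))

-- _relabel(label, a, b): merge the component labels of nodes a and b in one scan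
def relabelB (lab : List Nat) (a b : Nat) : List Nat :=
  let la := lab.getD a 0
  let lb := lab.getD b 0
  if la ≠ lb then lab.map (fun x => if x = la then lb else x) else lab

def part1_alt (inp : List (Int × Int × Int)) : Int :=
  let L := inp.length
  let pairs := PySem.List.sorted (pairsB L)
    (fun p => distB (inp.getD p.1 (0, 0, 0)) (inp.getD p.2 (0, 0, 0))) false
  let ncon : Nat := if L < 25 then 10 else 1000
  let label := (pairs.take ncon).foldl (fun lab e => relabelB lab e.1 e.2) (List.range L)
  -- counts[x] = counts.get(x, 0) + 1
  let counts := label.foldl (fun d x => d.insert x (d.getD x 0 + 1)) PySem.Dict.empty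
  -- prod = 1; for s in sorted(counts.values())[-3:]: prod *= s
  (PySem.List.slice (PySem.List.sorted counts.values (fun x => x) false) (some (-3)) none).foldl
    (fun acc s => acc * s) 1

-- ===== PRECONDITION & SPEC =====
-- Pre_ excludes only the empty list, on which A's reduce over an empty slice raises TypeError.
def Pre_part1 (inp : List (Int × Int × Int)) : Prop := inp ≠ []
instance (inp : List (Int × Int × Int)) : Decidable (Pre_part1 inp) := by unfold Pre_part1; infer_instance
def pvWitness_part1 : (List (Int × Int × Int)) := [(0, 0, 0), (1, 2, 3)]

def Spec_part1 (inp : List (Int × Int × Int)) (out : Int) : Prop := out = part1_alt inp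
instance (inp : List (Int × Int × Int)) (out : Int) : Decidable (Spec_part1 inp out) := by unfold Spec_part1; infer_instance

-- ===== CLAIM (what is proved, stated in full; the proofs are below) =====
def Claim_equal_part1 : Prop := ∀ (inp : List (Int × Int × Int)), Dom_part1 inp → Pre_part1 inp → Spec_part1 inp (part1 inp)

-- ===== LEMMAS AND PROOFS =====

-- ---------- small getD toolkit ----------

theorem pvGetD_lt {ps : List Nat} {i : Nat} (h : i < ps.length) (d d' : Nat) :
    ps.getD i d = ps.getD i d' := by
  simp [List.getD_eq_getElem?_getD, List.getElem?_eq_getElem h]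

theorem pvGetD_set_self {ps : List Nat} {i : Nat} (h : i < ps.length) (v d : Nat) :
    (ps.set i v).getD i d = v := by
  simp [List.getD_eq_getElem?_getD, h]

theorem pvGetD_set_ne {ps : List Nat} {i j : Nat} (h : i ≠ j) (v d : Nat) :
    (ps.set i v).getD j d = ps.getD j d := by
  simp [List.getD_eq_getElem?_getD, List.getElem?_set_ne h]

theorem pvGetD_map {lab : List Nat} {f : Nat → Nat} {i : Nat} (h : i < lab.length) (d : Nat) :
    (lab.map f).getD i d = f (lab.getD i d) := by
  simp [List.getD_eq_getElem?_getD, h]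


-- ---------- the root function of a parent forest ----------

def rootF : Nat → List Nat → Nat → Nat
  | 0, _, n => n
  | f + 1, ps, n =>
    let p := ps.getD n n
    if p = n then n else rootF f ps p

def Root (L : Nat) (ps : List Nat) (n : Nat) : Nat := rootF L ps n

-- invariant of A's parent list: right length, and every parent is ≥ its node and < L
def UFInv (L : Nat) (ps : List Nat) : Prop :=
  ps.length = L ∧ ∀ i, i < L → i ≤ ps.getD i i ∧ ps.getD i i < L

theorem rootF_fuel {L : Nat} {ps : List Nat} (hInv : UFInv L ps) :
    ∀ k f g n, n < L → L - n ≤ k → L - n ≤ f → L - n ≤ g →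
      rootF f ps n = rootF g ps n := by
  intro k
  induction k with
  | zero => intro f g n hn hk _ _; omega
  | succ k ih =>
    intro f g n hn hk hf hg
    obtain ⟨f, rfl⟩ : ∃ f', f = f' + 1 := ⟨f - 1, by omega⟩
    obtain ⟨g, rfl⟩ : ∃ g', g = g' + 1 := ⟨g - 1, by omega⟩
    simp only [rootF]
    by_cases hp : ps.getD n n = n
    · rw [if_pos hp, if_pos hp]
    · rw [if_neg hp, if_neg hp]
      have hb := hInv.2 n hn
      exact ih f g (ps.getD n n) hb.2 (by omega) (by omega) (by omega)

theorem Root_unfold {L : Nat} {ps : List Nat} (hInv : UFInv L ps) {n : Nat} (hn : n < L) :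
    Root L ps n = if ps.getD n n = n then n else Root L ps (ps.getD n n) := by
  have hb := hInv.2 n hn
  obtain ⟨m, hm⟩ : ∃ m, L = m + 1 := ⟨L - 1, by omega⟩
  by_cases hp : ps.getD n n = n
  · simp only [hp, if_true]
    show rootF L ps n = n
    rw [hm]
    simp only [rootF]
    rw [if_pos hp]
  · simp only [hp, if_false]
    show rootF L ps n = rootF L ps (ps.getD n n)
    conv_lhs => rw [hm]
    simp only [rootF]
    rw [if_neg hp]
    exact rootF_fuel hInv L m L (ps.getD n n) hb.2 (by omega) (by omega) (by omega)

theorem Root_props {L : Nat} {ps : List Nat} (hInv : UFInv L ps) :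
    ∀ n, n < L → n ≤ Root L ps n ∧ Root L ps n < L ∧
      ps.getD (Root L ps n) (Root L ps n) = Root L ps n := by
  suffices h : ∀ k n, n < L → L - n ≤ k → n ≤ Root L ps n ∧ Root L ps n < L ∧
      ps.getD (Root L ps n) (Root L ps n) = Root L ps n by
    intro n hn; exact h L n hn (by omega)
  intro k
  induction k with
  | zero => intro n hn hk; omega
  | succ k ih =>
    intro n hn hk
    rw [Root_unfold hInv hn]
    by_cases hp : ps.getD n n = n
    · rw [if_pos hp]; exact ⟨le_refl n, hn, hp⟩
    · simp only [hp, if_false]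
      have hb := hInv.2 n hn
      have h2 := ih (ps.getD n n) hb.2 (by omega)
      exact ⟨le_trans (by omega) h2.1, h2.2.1, h2.2.2⟩

theorem Root_eq_self_iff {L : Nat} {ps : List Nat} (hInv : UFInv L ps) {n : Nat} (hn : n < L) :
    Root L ps n = n ↔ ps.getD n n = n := by
  constructor
  · intro h
    by_contra hp
    have hb := hInv.2 n hn
    have h2 := Root_props hInv (ps.getD n n) hb.2
    rw [Root_unfold hInv hn] at h
    simp only [hp, if_false] at h
    omega
  · intro hp
    rw [Root_unfold hInv hn, if_pos hp]

-- setting a root's parent to a larger root: classes of the two roots merge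
theorem Root_set_merge {L : Nat} {ps : List Nat} (hInv : UFInv L ps) {r v : Nat}
    (hrL : r < L) (hvL : v < L) (hr : ps.getD r r = r) (hv : ps.getD v v = v) (hrv : r < v) :
    UFInv L (ps.set r v) ∧
      ∀ m, m < L → Root L (ps.set r v) m = if Root L ps m = r then v else Root L ps m := by
  have hlenL : (ps.set r v).length = L := by rw [List.length_set]; exact hInv.1
  have hInv' : UFInv L (ps.set r v) := by
    refine ⟨hlenL, ?_⟩
    intro i hi
    by_cases hir : i = r
    · rw [hir, pvGetD_set_self (by rw [hInv.1]; exact hrL) v r]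
      exact ⟨by omega, hvL⟩
    · rw [pvGetD_set_ne (Ne.symm hir) v i]
      exact hInv.2 i hi
  refine ⟨hInv', ?_⟩
  suffices h : ∀ k m, m < L → L - m ≤ k →
      Root L (ps.set r v) m = if Root L ps m = r then v else Root L ps m by
    intro m hm; exact h L m hm (by omega)
  intro k
  induction k with
  | zero => intro m hm hk; omega
  | succ k ih =>
    intro m hm hk
    by_cases hmr : m = r
    · have hRm : Root L ps m = r := by rw [hmr]; exact (Root_eq_self_iff hInv hrL).2 hr
      rw [if_pos hRm, hmr, Root_unfold hInv' hrL,
        pvGetD_set_self (by rw [hInv.1]; exact hrL) v r, if_neg (by omega : ¬ v = r)]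
      have hfix : (ps.set r v).getD v v = v := by
        rw [pvGetD_set_ne (by omega : r ≠ v) v v]; exact hv
      exact (Root_eq_self_iff hInv' hvL).2 hfix
    · have hgd : (ps.set r v).getD m m = ps.getD m m := pvGetD_set_ne (Ne.symm hmr) v m
      rw [Root_unfold hInv' hm, hgd, Root_unfold hInv hm]
      by_cases hp : ps.getD m m = m
      · rw [if_pos hp, if_pos hp, if_neg hmr]
      · rw [if_neg hp, if_neg hp]
        have hb := hInv.2 m hm
        exact ih (ps.getD m m) hb.2 (by omega)

-- path compression: setting ps[n] to n's root changes no root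
theorem Root_set_comp {L : Nat} {ps : List Nat} (hInv : UFInv L ps) {n : Nat} (hn : n < L) :
    UFInv L (ps.set n (Root L ps n)) ∧
      ∀ m, m < L → Root L (ps.set n (Root L ps n)) m = Root L ps m := by
  have hprops := Root_props hInv n hn
  have hlenL : (ps.set n (Root L ps n)).length = L := by rw [List.length_set]; exact hInv.1
  have hInv' : UFInv L (ps.set n (Root L ps n)) := by
    refine ⟨hlenL, ?_⟩
    intro i hi
    by_cases hin : i = n
    · rw [hin, pvGetD_set_self (by rw [hInv.1]; exact hn) _ n]
      exact ⟨hprops.1, hprops.2.1⟩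
    · rw [pvGetD_set_ne (Ne.symm hin) _ i]
      exact hInv.2 i hi
  refine ⟨hInv', ?_⟩
  suffices h : ∀ k m, m < L → L - m ≤ k →
      Root L (ps.set n (Root L ps n)) m = Root L ps m by
    intro m hm; exact h L m hm (by omega)
  intro k
  induction k with
  | zero => intro m hm hk; omega
  | succ k ih =>
    intro m hm hk
    by_cases hmn : m = n
    · rw [hmn, Root_unfold hInv' hn, pvGetD_set_self (by rw [hInv.1]; exact hn) _ n]
      by_cases hv : Root L ps n = n
      · rw [if_pos hv, hv]
      · rw [if_neg hv]
        have hfix : (ps.set n (Root L ps n)).getD (Root L ps n) (Root L ps n) = Root L ps n := by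
          rw [pvGetD_set_ne (Ne.symm hv) _ _]; exact hprops.2.2
        exact (Root_eq_self_iff hInv' hprops.2.1).2 hfix
    · have hgd : (ps.set n (Root L ps n)).getD m m = ps.getD m m := pvGetD_set_ne (Ne.symm hmn) _ m
      rw [Root_unfold hInv' hm, hgd, Root_unfold hInv hm]
      by_cases hp : ps.getD m m = m
      · rw [if_pos hp, if_pos hp]
      · rw [if_neg hp, if_neg hp]
        have hb := hInv.2 m hm
        exact ih (ps.getD m m) hb.2 (by omega)

theorem gpA_spec {L : Nat} {ps : List Nat} (hInv : UFInv L ps) :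
    ∀ f n, n < L → L - n ≤ f →
      (gpA f ps n).2 = Root L ps n ∧ UFInv L (gpA f ps n).1 ∧
      (∀ m, m < L → Root L (gpA f ps n).1 m = Root L ps m) ∧
      (∀ m, m < n → (gpA f ps n).1.getD m m = ps.getD m m) := by
  intro f
  induction f with
  | zero => intro n hn hf; omega
  | succ f ih =>
    intro n hn hf
    simp only [gpA]
    by_cases hp : ps.getD n n = n
    · rw [if_neg (not_not_intro hp)]
      refine ⟨?_, hInv, fun m _ => rfl, fun m _ => rfl⟩
      show ps.getD n n = Root L ps n
      rw [hp, (Root_eq_self_iff hInv hn).2 hp]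
    · rw [if_pos hp]
      have hb := hInv.2 n hn
      obtain ⟨hg2, hgInv, hgroots, hglow⟩ := ih (ps.getD n n) hb.2 (by omega)
      have hpn : Root L ps n = Root L ps (ps.getD n n) := by
        rw [Root_unfold hInv hn, if_neg hp]
      have hrw : (gpA f ps (ps.getD n n)).2 = Root L (gpA f ps (ps.getD n n)).1 n := by
        rw [hg2, hgroots n hn, hpn]
      obtain ⟨hInv', hroots'⟩ := Root_set_comp hgInv hn
      refine ⟨?_, ?_, ?_, ?_⟩
      · show (gpA f ps (ps.getD n n)).2 = Root L ps n
        rw [hg2, hpn]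
      · show UFInv L ((gpA f ps (ps.getD n n)).1.set n (gpA f ps (ps.getD n n)).2)
        rw [hrw]; exact hInv'
      · intro m hm
        show Root L ((gpA f ps (ps.getD n n)).1.set n (gpA f ps (ps.getD n n)).2) m = Root L ps m
        rw [hrw, hroots' m hm, hgroots m hm]
      · intro m hmn
        show ((gpA f ps (ps.getD n n)).1.set n (gpA f ps (ps.getD n n)).2).getD m m = ps.getD m m
        rw [pvGetD_set_ne (by omega : n ≠ m) _ m]
        exact hglow m (by omega)

theorem unionA_spec {L : Nat} {ps : List Nat} {sz : List Int} (hInv : UFInv L ps)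
    {a b : Nat} (ha : a < L) (hb : b < L) :
    UFInv L (unionA L (ps, sz) a b).1 ∧
      ∀ m, m < L → Root L (unionA L (ps, sz) a b).1 m =
        if Root L ps m = Root L ps a ∨ Root L ps m = Root L ps b
        then max (Root L ps a) (Root L ps b) else Root L ps m := by
  obtain ⟨ha2, hInv1, hroots1, _⟩ := gpA_spec hInv L a ha (by omega)
  obtain ⟨hb2, hInv2, hroots2, _⟩ := gpA_spec hInv1 L b hb (by omega)
  have hb2' : (gpA L (gpA L ps a).1 b).2 = Root L ps b := by rw [hb2, hroots1 b hb]
  have hchain : ∀ m, m < L → Root L (gpA L (gpA L ps a).1 b).1 m = Root L ps m := by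
    intro m hm; rw [hroots2 m hm, hroots1 m hm]
  have hpa := Root_props hInv a ha
  have hpb := Root_props hInv b hb
  have hfixa : (gpA L (gpA L ps a).1 b).1.getD (Root L ps a) (Root L ps a) = Root L ps a := by
    have h := (Root_props hInv2 a ha).2.2
    rw [hchain a ha] at h; exact h
  have hfixb : (gpA L (gpA L ps a).1 b).1.getD (Root L ps b) (Root L ps b) = Root L ps b := by
    have h := (Root_props hInv2 b hb).2.2
    rw [hchain b hb] at h; exact h
  simp only [unionA, ha2, hb2']
  by_cases hab : Root L ps a = Root L ps b
  · rw [if_pos hab]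
    refine ⟨hInv2, ?_⟩
    intro m hm
    rw [hchain m hm]
    by_cases h1 : Root L ps m = Root L ps a
    · simp [h1, hab]
    · by_cases h2 : Root L ps m = Root L ps b
      · simp [h2, ← hab]
      · simp [h1, h2]
  · rw [if_neg hab]
    by_cases hgt : Root L ps a > Root L ps b
    · rw [if_pos hgt]
      obtain ⟨hInv3, hroots3⟩ := Root_set_merge hInv2 hpb.2.1 hpa.2.1 hfixb hfixa hgt
      refine ⟨hInv3, ?_⟩
      intro m hm
      rw [hroots3 m hm, hchain m hm, Nat.max_eq_left (le_of_lt hgt)]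
      by_cases h1 : Root L ps m = Root L ps b
      · simp [h1]
      · by_cases h2 : Root L ps m = Root L ps a
        · simp [h2]
        · simp [h1, h2]
    · rw [if_neg hgt]
      have hlt : Root L ps a < Root L ps b := by omega
      obtain ⟨hInv3, hroots3⟩ := Root_set_merge hInv2 hpa.2.1 hpb.2.1 hfixa hfixb hlt
      refine ⟨hInv3, ?_⟩
      intro m hm
      rw [hroots3 m hm, hchain m hm, Nat.max_eq_right (le_of_lt hlt)]
      by_cases h1 : Root L ps m = Root L ps a
      · simp [h1]
      · by_cases h2 : Root L ps m = Root L ps b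
        · simp [h2]
        · simp [h1, h2]

-- ---------- the kernel invariant tying A's forest to B's labels ----------

def Ker (L : Nat) (ps lab : List Nat) : Prop :=
  ∀ i j, i < L → j < L → (Root L ps i = Root L ps j ↔ lab.getD i 0 = lab.getD j 0)

theorem subst_ker {r1 r2 c x y : Nat} (hc : c = r1 ∨ c = r2) :
    ((if x = r1 ∨ x = r2 then c else x) = (if y = r1 ∨ y = r2 then c else y)) ↔
      (x = y ∨ ((x = r1 ∨ x = r2) ∧ (y = r1 ∨ y = r2))) := by
  split_ifs with h1 h2 <;> omega

theorem step_pres {L : Nat} {ps lab : List Nat} {sz : List Int} (hInv : UFInv L ps)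
    (hlen : lab.length = L) (hker : Ker L ps lab) {a b : Nat} (ha : a < L) (hb : b < L) :
    UFInv L (unionA L (ps, sz) a b).1 ∧ (relabelB lab a b).length = L ∧
      Ker L (unionA L (ps, sz) a b).1 (relabelB lab a b) := by
  obtain ⟨hInvU, hrootsU⟩ := unionA_spec hInv (sz := sz) ha hb
  have hiff := hker a b ha hb
  unfold relabelB
  by_cases hlab : lab.getD a 0 = lab.getD b 0
  · rw [if_neg (not_not_intro hlab)]
    have e1 : ∀ m, m < L →
        (if Root L ps m = Root L ps a ∨ Root L ps m = Root L ps b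
          then max (Root L ps a) (Root L ps b) else Root L ps m) = Root L ps m := by
      intro m hm
      rw [hiff.2 hlab]
      by_cases h : Root L ps m = Root L ps b
      · simp [h]
      · simp [h]
    refine ⟨hInvU, hlen, ?_⟩
    intro i j hi hj
    rw [hrootsU i hi, hrootsU j hj, e1 i hi, e1 j hj]
    exact hker i j hi hj
  · rw [if_pos hlab]
    refine ⟨hInvU, by rw [List.length_map]; exact hlen, ?_⟩
    intro i j hi hj
    rw [hrootsU i hi, hrootsU j hj,
      pvGetD_map (by rw [hlen]; exact hi) 0, pvGetD_map (by rw [hlen]; exact hj) 0]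
    have hf : ∀ x, (if x = lab.getD a 0 then lab.getD b 0 else x) =
        if x = lab.getD a 0 ∨ x = lab.getD b 0 then lab.getD b 0 else x := by
      intro x
      by_cases h1 : x = lab.getD a 0
      · rw [if_pos h1, if_pos (Or.inl h1)]
      · by_cases h2 : x = lab.getD b 0
        · rw [if_neg h1, if_pos (Or.inr h2), h2]
        · rw [if_neg h1, if_neg (by tauto)]
    rw [hf (lab.getD i 0), hf (lab.getD j 0)]
    rw [subst_ker (r1 := Root L ps a) (r2 := Root L ps b)
        (x := Root L ps i) (y := Root L ps j) (max_choice _ _),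
      subst_ker (r1 := lab.getD a 0) (r2 := lab.getD b 0)
        (x := lab.getD i 0) (y := lab.getD j 0) (Or.inr rfl)]
    have hia := hker i a hi ha
    have hib := hker i b hi hb
    have hja := hker j a hj ha
    have hjb := hker j b hj hb
    have hij := hker i j hi hj
    omega

theorem fold_pres {L : Nat} (E : List (Nat × Nat)) (hE : ∀ e ∈ E, e.1 < L ∧ e.2 < L) :
    ∀ ps lab sz, UFInv L ps → lab.length = L → Ker L ps lab →
      UFInv L (E.foldl (fun st p => unionA L st p.1 p.2) (ps, sz)).1 ∧
      (E.foldl (fun lab e => relabelB lab e.1 e.2) lab).length = L ∧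
      Ker L (E.foldl (fun st p => unionA L st p.1 p.2) (ps, sz)).1
            (E.foldl (fun lab e => relabelB lab e.1 e.2) lab) := by
  induction E with
  | nil => intro ps lab sz h1 h2 h3; exact ⟨h1, h2, h3⟩
  | cons e E ih =>
    intro ps lab sz h1 h2 h3
    have he := hE e List.mem_cons_self
    obtain ⟨hU, hlen', hker'⟩ := step_pres h1 h2 h3 he.1 he.2
    simp only [List.foldl_cons]
    exact ih (fun e' he' => hE e' (List.mem_cons_of_mem _ he')) _ _ _ hU hlen' hker'

theorem getUnions_spec {L : Nat} {ps : List Nat} (hInv : UFInv L ps) :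
    (getUnionsPs L L ps).length = L ∧
      ∀ m, m < L → (getUnionsPs L L ps).getD m 0 = Root L ps m := by
  suffices h : ∀ k, k ≤ L →
      UFInv L ((List.range k).foldl (fun ps i => let g := gpA L ps i; g.1.set i g.2) ps) ∧
      (∀ m, m < L →
        Root L ((List.range k).foldl (fun ps i => let g := gpA L ps i; g.1.set i g.2) ps) m =
          Root L ps m) ∧
      (∀ m, m < k →
        ((List.range k).foldl (fun ps i => let g := gpA L ps i; g.1.set i g.2) ps).getD m 0 =
          Root L ps m) by
    obtain ⟨hI, _, hG⟩ := h L (le_refl L)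
    exact ⟨hI.1, hG⟩
  intro k
  induction k with
  | zero =>
    intro _
    rw [List.range_zero]
    exact ⟨hInv, fun m _ => rfl, fun m hm => absurd hm (Nat.not_lt_zero m)⟩
  | succ k ih =>
    intro hk
    obtain ⟨hI, hR, hG⟩ := ih (by omega)
    rw [List.range_succ, List.foldl_append, List.foldl_cons, List.foldl_nil]
    set q := (List.range k).foldl (fun ps i => let g := gpA L ps i; g.1.set i g.2) ps with hq
    show UFInv L ((gpA L q k).1.set k (gpA L q k).2) ∧ _ ∧ _
    have hkL : k < L := by omega
    obtain ⟨hg2, hgInv, hgroots, hglow⟩ := gpA_spec hI L k hkL (by omega)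
    have hrw : (gpA L q k).2 = Root L q k := hg2
    have hv : Root L q k = Root L (gpA L q k).1 k := (hgroots k hkL).symm
    obtain ⟨hInv', hroots'⟩ := Root_set_comp hgInv hkL
    have hlenq : q.length = L := hI.1
    have hleng : (gpA L q k).1.length = L := hgInv.1
    refine ⟨?_, ?_, ?_⟩
    · show UFInv L ((gpA L q k).1.set k (gpA L q k).2)
      rw [hrw, hv]; exact hInv'
    · intro m hm
      show Root L ((gpA L q k).1.set k (gpA L q k).2) m = Root L ps m
      rw [hrw, hv, hroots' m hm, hgroots m hm, hR m hm]
    · intro m hm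
      show ((gpA L q k).1.set k (gpA L q k).2).getD m 0 = Root L ps m
      by_cases hmk : m = k
      · rw [hmk, pvGetD_set_self (by rw [hleng]; exact hkL) _ 0, hg2, hR k hkL]
      · have hmk' : m < k := by omega
        rw [pvGetD_set_ne (Ne.symm hmk) _ 0,
          pvGetD_lt (by rw [hleng]; omega) 0 m, hglow m hmk',
          pvGetD_lt (by rw [hlenq]; omega) m 0]
        exact hG m hmk'

-- ---------- first-occurrence lists and counts ----------

def fo : List Nat → List Nat
  | [] => []
  | x :: xs => x :: fo (xs.filter (fun y => y ≠ x))
termination_by l => l.length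
decreasing_by
  have h := List.length_filter_le (fun (y : {y // y ∈ xs}) => decide ((y : Nat) ≠ x)) xs.attach
  simp at h ⊢
  omega

theorem fo_nil : fo [] = [] := by rw [fo]

theorem fo_cons (x : Nat) (xs : List Nat) :
    fo (x :: xs) = x :: fo (xs.filter (fun y => y ≠ x)) := by
  rw [fo]

theorem fo_subset : ∀ (N : Nat) (xs : List Nat), xs.length ≤ N → ∀ v ∈ fo xs, v ∈ xs := by
  intro N
  induction N with
  | zero =>
    intro xs h v hv
    cases xs with
    | nil => rw [fo] at hv; cases hv
    | cons x t => simp at h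
  | succ N ih =>
    intro xs h v hv
    cases xs with
    | nil => rw [fo] at hv; cases hv
    | cons x t =>
      rw [fo_cons] at hv
      rcases List.mem_cons.1 hv with h1 | h1
      · rw [h1]; exact List.mem_cons_self
      · have hlen : (t.filter (fun y => y ≠ x)).length ≤ N :=
          le_trans (List.length_filter_le _ _) (by simp at h; omega)
        have := ih _ hlen v h1
        exact List.mem_cons_of_mem _ (List.mem_of_mem_filter this)

theorem foldl_add_eq_fo : ∀ (xs acc : List Nat),
    xs.foldl PySem.Set.add acc = acc ++ fo (xs.filter (fun y => !acc.contains y)) := by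
  intro xs
  induction xs with
  | nil => intro acc; simp [fo_nil]
  | cons x xs ih =>
    intro acc
    rw [List.foldl_cons]
    by_cases hx : x ∈ acc
    · have hadd : PySem.Set.add acc x = acc := by simp [PySem.Set.add, hx]
      have hfilt : (x :: xs).filter (fun y => !acc.contains y) =
          xs.filter (fun y => !acc.contains y) := by
        rw [List.filter_cons]; simp [hx]
      rw [hadd, ih acc, hfilt]
    · have hadd : PySem.Set.add acc x = acc ++ [x] := by simp [PySem.Set.add, hx]
      have hfilt : (x :: xs).filter (fun y => !acc.contains y) =
          x :: xs.filter (fun y => !acc.contains y) := by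
        rw [List.filter_cons]; simp [hx]
      rw [hadd, ih (acc ++ [x]), hfilt, fo_cons]
      have hff : xs.filter (fun y => !(acc ++ [x]).contains y) =
          (xs.filter (fun y => !acc.contains y)).filter (fun y => y ≠ x) := by
        rw [List.filter_filter]
        apply List.filter_congr
        intro y hy
        by_cases hxy : y = x
        · simp [hxy]
        · simp [hxy]
      rw [hff, List.append_assoc, List.singleton_append]

theorem dedup_eq_fo (xs : List Nat) : PySem.List.dedup xs = fo xs := by
  rw [PySem.List.dedup_eq_ofList, PySem.Set.ofList_eq_foldl, foldl_add_eq_fo xs []]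
  simp

theorem hcount (zs : List (Nat × Nat)) (a b : Nat)
    (h : ∀ q ∈ zs, (q.1 = a ↔ q.2 = b)) :
    (zs.map Prod.fst).count a = (zs.map Prod.snd).count b := by
  rw [List.count, List.countP_map, List.count, List.countP_map]
  apply List.countP_congr
  intro q hq
  have hiq := h q hq
  by_cases h1 : q.1 = a
  · simp only [Function.comp_apply]
    simp [h1, hiq.1 h1]
  · have h2 : ¬ q.2 = b := fun hc => h1 (hiq.2 hc)
    simp only [Function.comp_apply]
    simp [h1, h2]

-- two index-aligned value lists have the same first-occurrence count sequences
theorem cnt_aligned : ∀ (N : Nat) (zs : List (Nat × Nat)), zs.length ≤ N →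
    (∀ p ∈ zs, ∀ q ∈ zs, (p.1 = q.1 ↔ p.2 = q.2)) →
    (fo (zs.map Prod.fst)).map (fun k => ((zs.map Prod.fst).count k : Int)) =
      (fo (zs.map Prod.snd)).map (fun k => ((zs.map Prod.snd).count k : Int)) := by
  intro N
  induction N with
  | zero =>
    intro zs h _
    have hz : zs = [] := List.eq_nil_of_length_eq_zero (by omega)
    rw [hz]; rfl
  | succ N ih =>
    intro zs h halign
    cases zs with
    | nil => rfl
    | cons p t =>
      have hp : p ∈ p :: t := List.mem_cons_self
      have ht : t.length ≤ N := by simp at h; omega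
      simp only [List.map_cons]
      rw [fo_cons, fo_cons, List.map_cons, List.map_cons]
      -- the fst- and snd-filters keep exactly the same rows
      have hsame : t.filter (fun q => q.1 ≠ p.1) = t.filter (fun q => q.2 ≠ p.2) := by
        apply List.filter_congr
        intro q hq
        have hiq := halign q (List.mem_cons_of_mem _ hq) p hp
        by_cases h1 : q.1 = p.1
        · simp [h1, hiq.1 h1]
        · have h2 : ¬ q.2 = p.2 := fun hc => h1 (hiq.2 hc)
          simp [h1, h2]
      have hf1 : (t.map Prod.fst).filter (fun y => y ≠ p.1) =
          (t.filter (fun q => q.1 ≠ p.1)).map Prod.fst := by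
        rw [List.filter_map]; rfl
      have hf2 : (t.map Prod.snd).filter (fun y => y ≠ p.2) =
          (t.filter (fun q => q.1 ≠ p.1)).map Prod.snd := by
        rw [List.filter_map, hsame]; rfl
      rw [hf1, hf2]
      congr 1
      · exact_mod_cast hcount (p :: t) p.1 p.2 (fun q hq => halign q hq p hp)
      · -- tails: replace full-list counts by filtered-list counts, then use the IH
        have hlen' : (t.filter (fun q => q.1 ≠ p.1)).length ≤ N :=
          le_trans (List.length_filter_le _ _) ht
        have halign' : ∀ p' ∈ t.filter (fun q => q.1 ≠ p.1),
            ∀ q' ∈ t.filter (fun q => q.1 ≠ p.1), (p'.1 = q'.1 ↔ p'.2 = q'.2) := by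
          intro p' hp' q' hq'
          exact halign p' (List.mem_cons_of_mem _ (List.mem_of_mem_filter hp'))
            q' (List.mem_cons_of_mem _ (List.mem_of_mem_filter hq'))
        have hcnt1 : ∀ k ∈ fo ((t.filter (fun q => q.1 ≠ p.1)).map Prod.fst),
            ((p.1 :: t.map Prod.fst).count k : Int) =
              (((t.filter (fun q => q.1 ≠ p.1)).map Prod.fst).count k : Int) := by
          intro k hk
          have hk' := fo_subset _ _ le_rfl k hk
          obtain ⟨q, hqf, rfl⟩ := List.mem_map.1 hk'
          have hqne : q.1 ≠ p.1 := by
            have := (List.mem_filter.1 hqf).2; simpa using this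
          rw [List.count_cons_of_ne (Ne.symm hqne), ← hf1,
            List.count_filter (by simp [hqne])]
        have hcnt2 : ∀ k ∈ fo ((t.filter (fun q => q.1 ≠ p.1)).map Prod.snd),
            ((p.2 :: t.map Prod.snd).count k : Int) =
              (((t.filter (fun q => q.1 ≠ p.1)).map Prod.snd).count k : Int) := by
          intro k hk
          have hk' := fo_subset _ _ le_rfl k hk
          obtain ⟨q, hqf, rfl⟩ := List.mem_map.1 hk'
          have hqf2 := hqf
          rw [hsame] at hqf2
          have hqne : q.2 ≠ p.2 := by
            have := (List.mem_filter.1 hqf2).2; simpa using this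
          rw [List.count_cons_of_ne (Ne.symm hqne), ← hf2,
            List.count_filter (by simp [hqne])]
        rw [List.map_congr_left hcnt1, List.map_congr_left hcnt2]
        exact ih _ hlen' halign'


-- ---------- assembling the main equivalence ----------

theorem distAB (a b : Int × Int × Int) : distA a b = distB a b := by
  simp [distA, distB, sq_abs]

theorem pairsBA : pairsB = pairsA := rfl

theorem pairsA_bounds {L : Nat} : ∀ e ∈ pairsA L, e.1 < L ∧ e.2 < L := by
  intro e he
  simp only [pairsA, List.mem_flatMap, List.mem_map] at he
  obtain ⟨i, hi, j, hj, rfl⟩ := he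
  exact ⟨List.mem_range.1 hi, List.mem_range.1 (List.mem_of_mem_drop hj)⟩

theorem getD_range {L i : Nat} (hi : i < L) (d : Nat) : (List.range L).getD i d = i := by
  rw [List.getD_eq_getElem?_getD, List.getElem?_range hi]; rfl

theorem init_inv (L : Nat) : UFInv L (List.range L) :=
  ⟨List.length_range, fun i hi => by rw [getD_range hi]; omega⟩

theorem root_range {L i : Nat} (hi : i < L) : Root L (List.range L) i = i :=
  (Root_eq_self_iff (init_inv L) hi).2 (getD_range hi i)

theorem init_ker (L : Nat) : Ker L (List.range L) (List.range L) := by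
  intro i j hi hj
  rw [root_range hi, root_range hj, getD_range hi 0, getD_range hj 0]

theorem counter_values (xs : List Nat) :
    (PySem.Dict.counter xs).values = (fo xs).map (fun k => (xs.count k : Int)) := by
  have h : PySem.Set.ofList xs = fo xs := by
    rw [← PySem.List.dedup_eq_ofList]; exact dedup_eq_fo xs
  simp only [PySem.Dict.values]
  rw [PySem.Dict.items_counter, List.map_map, h]
  rfl

theorem part1_main : ∀ inp : List (Int × Int × Int), inp ≠ [] → part1 inp = part1_alt inp := by
  intro inp hne
  simp only [part1, part1_alt, pairsBA]
  have hdist : (fun p : Nat × Nat =>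
      distB (inp.getD p.1 (0, 0, 0)) (inp.getD p.2 (0, 0, 0))) =
      (fun it : Nat × Nat => distA (inp.getD it.1 (0, 0, 0)) (inp.getD it.2 (0, 0, 0))) := by
    funext p; rw [distAB]
  rw [hdist]
  set L := inp.length with hLdef
  have hL : 0 < L := List.length_pos_iff.2 hne
  set ncon : Nat := if L < 25 then 10 else 1000 with hncon
  set E := (PySem.List.sorted (pairsA L)
    (fun it => distA (inp.getD it.1 (0, 0, 0)) (inp.getD it.2 (0, 0, 0))) false).take ncon
    with hE
  have hEb : ∀ e ∈ E, e.1 < L ∧ e.2 < L := by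
    intro e he
    exact pairsA_bounds e ((PySem.List.mem_sorted _ _ _ _).1 (List.mem_of_mem_take he))
  obtain ⟨hInvF, hlenF, hkerF⟩ := fold_pres E hEb (List.range L) (List.range L)
    (List.replicate L 1) (init_inv L) List.length_range (init_ker L)
  set stF := (E.foldl (fun st p => unionA L st p.1 p.2) (List.range L, List.replicate L 1)).1
    with hstF
  set lab := E.foldl (fun lab e => relabelB lab e.1 e.2) (List.range L) with hlab
  obtain ⟨hlenP, hgetP⟩ := getUnions_spec hInvF
  set psF := getUnionsPs L L stF with hpsF
  -- index-aligned pairing of A's final root list with B's final label list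
  set zs := psF.zip lab with hzs
  have hlen12 : psF.length = lab.length := by omega
  have hfst : zs.map Prod.fst = psF := List.map_fst_zip hlen12.le
  have hsnd : zs.map Prod.snd = lab := List.map_snd_zip hlen12.ge
  have halign : ∀ p ∈ zs, ∀ q ∈ zs, (p.1 = q.1 ↔ p.2 = q.2) := by
    intro p hp q hq
    obtain ⟨i, hiz, hpi⟩ := List.mem_iff_getElem.1 hp
    obtain ⟨j, hjz, hqj⟩ := List.mem_iff_getElem.1 hq
    have hzl : zs.length = L := by rw [hzs, List.length_zip]; omega
    have hiL : i < L := by omega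
    have hjL : j < L := by omega
    have hcomp : ∀ m, m < L → ∀ (hm : m < zs.length),
        zs[m].1 = Root L stF m ∧ zs[m].2 = lab.getD m 0 := by
      intro m hmL hm
      have hz : zs[m] = (psF[m]'(by omega), lab[m]'(by omega)) := by
        simp [hzs, List.getElem_zip]
      constructor
      · rw [hz]
        show psF[m]'(by omega) = Root L stF m
        rw [← List.getD_eq_getElem psF 0 (by omega)]
        exact hgetP m hmL
      · rw [hz]
        show lab[m]'(by omega) = lab.getD m 0
        rw [List.getD_eq_getElem lab 0 (by omega)]
    obtain ⟨hpi1, hpi2⟩ := hcomp i hiL hiz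
    obtain ⟨hqj1, hqj2⟩ := hcomp j hjL hjz
    rw [← hpi, ← hqj, hpi1, hpi2, hqj1, hqj2]
    exact hkerF i j hiL hjL
  have hcnt := cnt_aligned zs.length zs (le_refl _) halign
  rw [hfst, hsnd] at hcnt
  have hvals : (PySem.Dict.counter psF).values = (PySem.Dict.counter lab).values := by
    rw [counter_values, counter_values, hcnt]
  have hfoldB : lab.foldl (fun d x => d.insert x (d.getD x 0 + 1)) PySem.Dict.empty =
      PySem.Dict.counter lab := PySem.Dict.foldl_insert_getD_add_one_eq_counter lab
  rw [hfoldB, ← hvals]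
  -- both sides now slice the same sorted list; the list is nonempty since inp is
  set svals := PySem.List.sorted (PySem.Dict.counter psF).values (fun x => x) false with hsv
  have hpsne : psF ≠ [] := by
    intro h
    rw [h] at hlenP
    simp at hlenP
    omega
  have hvne : (PySem.Dict.counter psF).values ≠ [] := by
    obtain ⟨x, xs, hx⟩ := List.exists_cons_of_ne_nil hpsne
    rw [counter_values, hx, fo_cons]
    simp
  have hsne : svals ≠ [] := by
    rw [hsv]
    intro h
    exact hvne ((PySem.List.sorted_eq_nil_iff _ _ _).1 h)
  have hslice : PySem.List.slice svals (some (-3)) none = svals.drop (svals.length - 3) :=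
    PySem.List.slice_from_neg_ofNat svals 3 (by omega)
  rw [hslice]
  have hdne : svals.drop (svals.length - 3) ≠ [] := by
    intro h
    have := congrArg List.length h
    rw [List.length_drop] at this
    simp at this
    have : svals.length = 0 := by omega
    exact hsne (List.eq_nil_of_length_eq_zero this)
  obtain ⟨h0, t0, hht⟩ := List.exists_cons_of_ne_nil hdne
  rw [hht]
  show t0.foldl (fun acc x => acc * x) h0 = (h0 :: t0).foldl (fun acc s => acc * s) 1
  rw [List.foldl_cons, one_mul]

-- ===== VERDICT (by name: the statement is the Claim_ definition above) =====
theorem part1_spec : Claim_equal_part1 := by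
  intro inp _ hpre
  unfold Spec_part1
  exact part1_main inp hpre
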